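-- pv_equiv track=rewrite | github.com/solsteve/Calisto-trncmp | scripts/CardShuffle.py | incRunLength
-- ===== SOURCE A (Python) =====
-- def incSubSeq( list ):
--     #/ ----------------------------------------------------------------------
--     n = len(list)
--     count = 1;
--     prev  = list[0]
--     i = 1
--     while (i < n ):
--         x = list[i]
--         if ( 1 == (x - prev) ):
--             count += 1
--             i     += 1
--             prev   = x
--         else:
--             return (count,i)
--     return (count,None)
--
-- def incRunLength( list ):
--     #/ ----------------------------------------------------------------------
--     sub = []
--     idx = 0
--     while( True ):
--         c, n =  incSubSeq(list[idx:])
--         sub.append(c)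
--         if ( None == n ):
--             return sub
--         idx += n
-- ===== SOURCE B (Python) =====
-- def incRunLength(list):
--     # single linear pass counting run lengths (no slicing / re-scanning)
--     if not list:
--         return []
--     sub = []
--     count = 1
--     for prev, x in zip(list, list[1:]):
--         if x - prev == 1:
--             count += 1
--         else:
--             sub.append(count)
--             count = 1
--     sub.append(count)
--     return sub
-- ===== Notes on version B (the rewrite author's own statement) =====
-- stated objective: faster
-- what changed: Replaced the repeated slice-and-rescan via incSubSeq with a single linear pass over adjacent pairs that counts run lengths directly.
import Mathlib
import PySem

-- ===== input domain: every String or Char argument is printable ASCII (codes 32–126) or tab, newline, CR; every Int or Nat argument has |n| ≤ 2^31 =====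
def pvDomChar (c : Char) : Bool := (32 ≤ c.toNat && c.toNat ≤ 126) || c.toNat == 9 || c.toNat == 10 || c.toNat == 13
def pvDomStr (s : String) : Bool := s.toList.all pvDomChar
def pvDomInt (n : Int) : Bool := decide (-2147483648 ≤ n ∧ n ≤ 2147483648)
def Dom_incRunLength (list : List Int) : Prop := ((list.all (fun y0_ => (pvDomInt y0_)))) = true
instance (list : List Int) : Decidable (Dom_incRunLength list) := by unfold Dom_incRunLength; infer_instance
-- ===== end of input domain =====

-- B replaces A's repeated slice-and-rescan (incSubSeq on list[idx:]) with one linear pass over adjacent pairs.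
-- A raises IndexError on the empty list; Pre_ excludes it.

-- ===== PORT A =====
-- inner while loop of incSubSeq: state (count, prev, i), scanning l by index, n = len(l);
-- the Nat fuel only makes the recursion structural: with fuel ≥ n - i it never runs out before 'i < n' fails
def incSubSeqLoop (l : List Int) (n count prev i : Int) : Nat → Int × Option Int
  | 0 => (count, none)
  | fuel + 1 =>
    if i < n then
      match PySem.List.pyGet? l i with
      | none => (count, none)  -- unreachable: n = len(l), so list[i] cannot raise
      | some x =>
        if 1 = x - prev then incSubSeqLoop l n (count + 1) x (i + 1) fuel else (count, i)
    else (count, none)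

-- incSubSeq; a 'none' result = the IndexError that list[0] raises on an empty argument
def incSubSeq (l : List Int) : Option (Int × Option Int) :=
  match PySem.List.pyGet? l 0 with
  | none => none
  | some prev => some (incSubSeqLoop l l.length 1 prev 1 l.length)

-- outer while loop of incRunLength over the remaining suffix list[idx:]; 'sub' is the accumulator;
-- each pass consumes ≥ 1 element, so fuel = length of the original list suffices
def incRunLoop : Nat → List Int → List Int → List Int
  | 0, _, sub => sub
  | fuel + 1, s, sub =>
    match incSubSeq s with
    | none => sub                       -- incSubSeq raised (empty suffix); unreachable under Pre_
    | some (c, none) => sub ++ [c]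
    | some (c, some n) => incRunLoop fuel (PySem.List.slice s (some n) none) (sub ++ [c])

def incRunLength (list : List Int) : List Int := incRunLoop list.length list []

-- ===== PORT B =====
def incRunLength_alt (list : List Int) : List Int :=
  match list with
  | [] => []
  | _ :: _ =>
    let p := (List.zip list (list.drop 1)).foldl
      (fun (st : List Int × Int) pp =>
        if pp.2 - pp.1 = 1 then (st.1, st.2 + 1) else (st.1 ++ [st.2], 1)) ([], 1)
    p.1 ++ [p.2]

-- ===== PRECONDITION & SPEC =====
-- Pre_ excludes exactly the empty list, on which A raises IndexError (list[0] in incSubSeq).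
def Pre_incRunLength (list : List Int) : Prop := list ≠ []
instance (list : List Int) : Decidable (Pre_incRunLength list) := by unfold Pre_incRunLength; infer_instance
def pvWitness_incRunLength : List Int := [3, 4, 5, 1]

def Spec_incRunLength (list : List Int) (out : List Int) : Prop := out = incRunLength_alt list
instance (list : List Int) (out : List Int) : Decidable (Spec_incRunLength list out) := by unfold Spec_incRunLength; infer_instance

-- ===== CLAIM (what is proved, stated in full; the proofs are below) =====
def Claim_equal_incRunLength : Prop := ∀ (list : List Int), Dom_incRunLength list → Pre_incRunLength list → Spec_incRunLength list (incRunLength list)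

-- ===== LEMMAS AND PROOFS =====

-- reference structural recursion: run lengths of the tail given current count and previous element
def runsGo (count prev : Int) : List Int → List Int
  | [] => [count]
  | x :: rest => if x - prev = 1 then runsGo (count + 1) x rest else count :: runsGo 1 x rest

def runsNE : List Int → List Int
  | [] => []
  | x :: rest => runsGo 1 x rest

-- structural counterpart of incSubSeqLoop, recording the absolute offset k
def subGo (count prev k : Int) : List Int → Int × Option Int
  | [] => (count, none)
  | x :: r => if 1 = x - prev then subGo (count + 1) x (k + 1) r else (count, some k)

theorem incSubSeqLoop_eq_subGo (l : List Int) :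
    ∀ (fuel : Nat) (i count prev : Int), 0 ≤ i → l.length - i.toNat ≤ fuel →
      incSubSeqLoop l l.length count prev i fuel = subGo count prev i (l.drop i.toNat) := by
  intro fuel
  induction fuel with
  | zero =>
    intro i count prev h0 hf
    have hge : l.length ≤ i.toNat := by omega
    rw [incSubSeqLoop, List.drop_eq_nil_of_le hge, subGo]
  | succ fuel ih =>
    intro i count prev h0 hf
    by_cases hlt : i.toNat < l.length
    · have hget : PySem.List.pyGet? l i = some (l[i.toNat]) := by
        rw [PySem.List.pyGet?_of_nonneg l h0, List.getElem?_eq_getElem hlt]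
      have hdrop : l.drop i.toNat = l[i.toNat] :: l.drop (i.toNat + 1) :=
        List.drop_eq_getElem_cons hlt
      rw [incSubSeqLoop, if_pos (show i < (l.length : Int) by omega), hget, hdrop, subGo]
      dsimp only
      by_cases hc : (1 : Int) = l[i.toNat] - prev
      · rw [if_pos hc, if_pos hc, ih (i + 1) (count + 1) l[i.toNat] (by omega) (by omega)]
        have : (i + 1).toNat = i.toNat + 1 := by omega
        rw [this]
      · rw [if_neg hc, if_neg hc]
    · rw [incSubSeqLoop, if_neg (show ¬ i < (l.length : Int) by omega),
        List.drop_eq_nil_of_le (by omega), subGo]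

theorem subGo_none (rest : List Int) :
    ∀ count prev k c, subGo count prev k rest = (c, none) → runsGo count prev rest = [c] := by
  induction rest with
  | nil => intro count prev k c h; rw [subGo] at h; cases h; rfl
  | cons x r ih =>
    intro count prev k c h
    rw [subGo] at h
    rw [runsGo]
    by_cases hc : (1 : Int) = x - prev
    · rw [if_pos hc] at h
      rw [if_pos (by omega : x - prev = 1)]
      exact ih (count + 1) x (k + 1) c h
    · rw [if_neg hc] at h; cases h

theorem subGo_some (rest : List Int) :
    ∀ count prev k c m, subGo count prev k rest = (c, some m) →
      k ≤ m ∧ (m - k).toNat < rest.length ∧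
      runsGo count prev rest = c :: runsNE (rest.drop (m - k).toNat) := by
  induction rest with
  | nil => intro count prev k c m h; rw [subGo] at h; cases h
  | cons x r ih =>
    intro count prev k c m h
    rw [subGo] at h
    by_cases hc : (1 : Int) = x - prev
    · rw [if_pos hc] at h
      obtain ⟨h1, h2, h3⟩ := ih (count + 1) x (k + 1) c m h
      refine ⟨by omega, by simpa using by omega, ?_⟩
      rw [runsGo, if_pos (by omega : x - prev = 1), h3]
      have he : (m - k).toNat = (m - (k + 1)).toNat + 1 := by omega
      rw [he, List.drop_succ_cons]
    · rw [if_neg hc] at h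
      cases h
      refine ⟨le_refl _, by simp, ?_⟩
      rw [runsGo, if_neg (by omega : ¬ x - prev = 1)]
      simp [runsNE]

-- incSubSeq on a nonempty list, through the structural version
theorem incSubSeq_cons (p : Int) (rest : List Int) :
    incSubSeq (p :: rest) = some (subGo 1 p 1 rest) := by
  rw [incSubSeq, PySem.List.pyGet?_zero_cons]
  dsimp only
  rw [incSubSeqLoop_eq_subGo (p :: rest) (p :: rest).length 1 1 p (by omega) (by simp)]
  rfl

theorem incRunLoop_runs :
    ∀ (fuel : Nat) (s : List Int), s ≠ [] → s.length ≤ fuel →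
      ∀ sub, incRunLoop fuel s sub = sub ++ runsNE s := by
  intro fuel
  induction fuel with
  | zero =>
    intro s hs hf sub
    cases s with
    | nil => exact absurd rfl hs
    | cons p rest => simp at hf
  | succ fuel ih =>
    intro s hs hf sub
    cases s with
    | nil => exact absurd rfl hs
    | cons p rest =>
      rw [incRunLoop, incSubSeq_cons p rest]
      cases hr : subGo 1 p 1 rest with
      | mk c o =>
        cases o with
        | none =>
          dsimp only
          rw [show runsNE (p :: rest) = runsGo 1 p rest from rfl,
            subGo_none rest 1 p 1 c hr]
        | some m =>
          obtain ⟨h1, h2, h3⟩ := subGo_some rest 1 p 1 c m hr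
          dsimp only
          have hcast : m = ((m.toNat : Nat) : Int) := by omega
          rw [hcast, PySem.List.slice_from_natCast]
          have hdrop : (p :: rest).drop m.toNat = rest.drop (m - 1).toNat := by
            have : m.toNat = (m - 1).toNat + 1 := by omega
            rw [this, List.drop_succ_cons]
          rw [hdrop]
          have hne : rest.drop (m - 1).toNat ≠ [] := by
            intro he
            have := List.drop_eq_nil_iff.mp he
            omega
          have hlen : (rest.drop (m - 1).toNat).length ≤ fuel := by
            have := List.length_drop (l := rest) (i := (m - 1).toNat)
            simp at hf
            omega
          rw [ih _ hne hlen (sub ++ [c])]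
          rw [show runsNE (p :: rest) = runsGo 1 p rest from rfl, h3]
          simp

-- B's fold over adjacent pairs computes runsGo
theorem alt_fold (rest : List Int) :
    ∀ (acc : List Int) (count prev : Int),
      (((List.zip (prev :: rest) rest).foldl
        (fun (st : List Int × Int) pp =>
          if pp.2 - pp.1 = 1 then (st.1, st.2 + 1) else (st.1 ++ [st.2], 1)) (acc, count)).1
        ++ [((List.zip (prev :: rest) rest).foldl
        (fun (st : List Int × Int) pp =>
          if pp.2 - pp.1 = 1 then (st.1, st.2 + 1) else (st.1 ++ [st.2], 1)) (acc, count)).2])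
      = acc ++ runsGo count prev rest := by
  induction rest with
  | nil => intro acc count prev; simp [runsGo]
  | cons x r ih =>
    intro acc count prev
    rw [List.zip_cons_cons, List.foldl_cons]
    by_cases hc : x - prev = 1
    · dsimp only
      rw [if_pos hc, runsGo, if_pos hc]
      exact ih acc (count + 1) x
    · dsimp only
      rw [if_neg hc, runsGo, if_neg hc, ih (acc ++ [count]) 1 x]
      simp

theorem alt_runs (p : Int) (rest : List Int) :
    incRunLength_alt (p :: rest) = runsGo 1 p rest := by
  rw [incRunLength_alt]
  have := alt_fold rest [] 1 p
  simpa using this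

-- ===== VERDICT (by name: the statement is the Claim_ definition above) =====
theorem incRunLength_spec : Claim_equal_incRunLength := by
  intro list _ hpre
  unfold Spec_incRunLength incRunLength
  cases list with
  | nil => exact absurd rfl hpre
  | cons p rest =>
    rw [incRunLoop_runs (p :: rest).length _ (by simp) (le_refl _) [], alt_runs]
    simp [runsNE]
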